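-- pv_equiv track=rewrite | github.com/jonasrenault/advent2020 | advent2020/day24.py | flip_whites
-- ===== SOURCE A (Python) =====
-- from collections import defaultdict
-- from collections.abc import Iterator
--
-- def flip_whites(blacks: set[tuple[int, int]]) -> set[tuple[int, int]]:
--     """
--     Get set of tiles to flip from white to black
--
--     Args:
--         blacks (set[tuple[int, int]]): current black tiles
--
--     Returns:
--         set[tuple[int, int]]: set of tiles to flip black
--     """
--     white_neighbors = defaultdict(set)
--     for tile in blacks:
--         for n in neighbors(tile):
--             if n not in blacks:
--                 white_neighbors[n].add(tile)
--
--     to_flip = set()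
--     for tile, nneighbors in white_neighbors.items():
--         if len(nneighbors) == 2:
--             to_flip.add(tile)
--
--     return to_flip
--
-- def neighbors(tile: tuple[int, int]) -> Iterator[tuple[int, int]]:
--     for dir in ("e", "ne", "nw", "w", "sw", "se"):
--         yield move_one(tile, dir)
--
-- def move_one(tile: tuple[int, int], dir: str) -> tuple[int, int]:
--     """
--     Return coordinates of neighbor tile in given direction
--
--     Args:
--         tile (tuple[int, int]): start tile
--         dir (str): direction
--
--     Returns:
--         tuple[int, int]: neighbor tile
--     """
--     x, y = tile
--     match dir:
--         case "e":
--             return (x + 2, y)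
--         case "ne":
--             return (x + 1, y + 1)
--         case "nw":
--             return (x - 1, y + 1)
--         case "w":
--             return (x - 2, y)
--         case "sw":
--             return (x - 1, y - 1)
--         case "se":
--             return (x + 1, y - 1)
-- ===== SOURCE B (Python) =====
-- # B: build the candidate white-tile set first, then re-scan each candidate's six
-- # neighbors and count membership in blacks (reversed membership test; no per-white
-- # source-set accumulation). Correct because hex adjacency is symmetric.
--
-- OFFSETS = ((2, 0), (1, 1), (-1, 1), (-2, 0), (-1, -1), (1, -1))
--
--
-- def flip_whites(blacks: set[tuple[int, int]]) -> set[tuple[int, int]]: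
--     candidates = set()
--     for (x, y) in blacks:
--         for dx, dy in OFFSETS:
--             n = (x + dx, y + dy)
--             if n not in blacks:
--                 candidates.add(n)
--
--     to_flip = set()
--     for c in candidates:
--         count = 0
--         for dx, dy in OFFSETS:
--             if (c[0] + dx, c[1] + dy) in blacks:
--                 count += 1
--         if count == 2:
--             to_flip.add(c)
--     return to_flip
-- ===== Notes on version B (the rewrite author's own statement) =====
-- stated objective: alternative
-- what changed: Instead of accumulating, per white tile, the set of black source tiles in a defaultdict and testing its size, B first collects the candidate white tiles into a plain set and then re-scans each candidate's six neighbors, counting membership in the black set (reversed membership test, justified by the symmetry of hex adjacency).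
import Mathlib
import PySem

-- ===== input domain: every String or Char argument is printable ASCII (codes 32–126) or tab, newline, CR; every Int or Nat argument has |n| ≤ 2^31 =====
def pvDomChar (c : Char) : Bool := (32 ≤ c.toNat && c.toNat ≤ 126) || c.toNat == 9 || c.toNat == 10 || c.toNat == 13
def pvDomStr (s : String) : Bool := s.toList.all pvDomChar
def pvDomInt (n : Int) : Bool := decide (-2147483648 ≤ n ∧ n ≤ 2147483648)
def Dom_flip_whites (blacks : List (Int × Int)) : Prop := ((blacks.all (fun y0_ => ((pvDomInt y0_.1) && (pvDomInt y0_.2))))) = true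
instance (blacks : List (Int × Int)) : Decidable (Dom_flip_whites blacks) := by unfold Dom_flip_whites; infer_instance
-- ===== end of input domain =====

-- B differs from A: A groups, per white neighbor, the SET of black source tiles in a
-- defaultdict and flips whites whose source set has size 2; B collects candidate whites
-- in one pass and then re-scans each candidate's six neighbors, counting hits in blacks.
-- The equivalence is about the returned value (a set; both ports list it in first-insertion order).

-- ===== PORT A =====
-- Python's move_one returns None for a direction outside the six; it is only ever
-- called with the six literals below, so the last case is folded into the default arm.
def move_one (tile : Int × Int) (dir : String) : Int × Int :=
  if dir = "e" then (tile.1 + 2, tile.2)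
  else if dir = "ne" then (tile.1 + 1, tile.2 + 1)
  else if dir = "nw" then (tile.1 - 1, tile.2 + 1)
  else if dir = "w" then (tile.1 - 2, tile.2)
  else if dir = "sw" then (tile.1 - 1, tile.2 - 1)
  else (tile.1 + 1, tile.2 - 1)  -- "se"

def neighbors (tile : Int × Int) : List (Int × Int) :=
  ["e", "ne", "nw", "w", "sw", "se"].map (move_one tile)

def flip_whites (blacks : List (Int × Int)) : List (Int × Int) :=
  let white_neighbors : PySem.Dict (Int × Int) (PySem.Set (Int × Int)) :=
    blacks.foldl (fun d tile =>
      (neighbors tile).foldl (fun d n =>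
        if blacks.contains n then d
        else d.modify n PySem.Set.empty (fun s => PySem.Set.add s tile)) d)
      PySem.Dict.empty
  white_neighbors.items.foldl (fun to_flip p =>
    if p.2.length = 2 then PySem.Set.add to_flip p.1 else to_flip)
    PySem.Set.empty

-- ===== PORT B =====
def pvOffsets : List (Int × Int) := [(2, 0), (1, 1), (-1, 1), (-2, 0), (-1, -1), (1, -1)]

def flip_whites_alt (blacks : List (Int × Int)) : List (Int × Int) :=
  let candidates : PySem.Set (Int × Int) :=
    blacks.foldl (fun s t =>
      pvOffsets.foldl (fun s o =>
        if blacks.contains (t.1 + o.1, t.2 + o.2) then s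
        else PySem.Set.add s (t.1 + o.1, t.2 + o.2)) s)
      PySem.Set.empty
  candidates.foldl (fun to_flip c =>
    if (pvOffsets.foldl (fun cnt o =>
          if blacks.contains (c.1 + o.1, c.2 + o.2) then cnt + 1 else cnt) (0 : Int)) = 2
    then PySem.Set.add to_flip c else to_flip)
    PySem.Set.empty

-- ===== PRECONDITION & SPEC =====
def Spec_flip_whites (blacks : List (Int × Int)) (out : List (Int × Int)) : Prop := out = flip_whites_alt blacks
instance (blacks : List (Int × Int)) (out : List (Int × Int)) : Decidable (Spec_flip_whites blacks out) := by unfold Spec_flip_whites; infer_instance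

-- ===== CLAIM (what is proved, stated in full; the proofs are below) =====
def Claim_equal_flip_whites : Prop := ∀ (blacks : List (Int × Int)), Dom_flip_whites blacks → Spec_flip_whites blacks (flip_whites blacks)

-- ===== LEMMAS AND PROOFS =====

-- white neighbors of tile t (the list both inner loops effectively traverse)
def pvWs (blacks : List (Int × Int)) (t : Int × Int) : List (Int × Int) :=
  (neighbors t).filter (fun n => !blacks.contains n)

lemma neighbors_eq_map_offsets (t : Int × Int) :
    neighbors t = pvOffsets.map (fun o => (t.1 + o.1, t.2 + o.2)) := by
  simp [neighbors, move_one, pvOffsets]; omega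

lemma mem_neighbors_symm (c t : Int × Int) : c ∈ neighbors t ↔ t ∈ neighbors c := by
  rcases c with ⟨cx, cy⟩; rcases t with ⟨tx, ty⟩
  simp [neighbors, move_one, Prod.ext_iff]; omega

lemma nodup_neighbors (c : Int × Int) : (neighbors c).Nodup := by
  rcases c with ⟨cx, cy⟩
  simp [neighbors, move_one, Prod.ext_iff]; omega

-- A's inner loop over `neighbors t` equals the unconditional modify-loop over pvWs
lemma innerA_eq (blacks : List (Int × Int)) (t : Int × Int)
    (d : PySem.Dict (Int × Int) (PySem.Set (Int × Int))) :
    (neighbors t).foldl (fun d n =>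
        if blacks.contains n then d
        else d.modify n PySem.Set.empty (fun s => PySem.Set.add s t)) d
    = (pvWs blacks t).foldl (fun d n => d.modify n PySem.Set.empty (fun s => PySem.Set.add s t)) d := by
  rw [pvWs, List.foldl_filter]
  apply PySem.List.foldl_congr_mem
  intro acc x _
  simp

-- B's inner loop over offsets equals the add-loop over pvWs
lemma innerB_eq (blacks : List (Int × Int)) (t : Int × Int) (s : PySem.Set (Int × Int)) :
    pvOffsets.foldl (fun s o =>
        if blacks.contains (t.1 + o.1, t.2 + o.2) then s
        else PySem.Set.add s (t.1 + o.1, t.2 + o.2)) s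
    = (pvWs blacks t).foldl PySem.Set.add s := by
  rw [pvWs, List.foldl_filter, neighbors_eq_map_offsets, List.foldl_map]
  apply PySem.List.foldl_congr_mem
  intro acc x _
  simp

-- lookup through A's inner modify-loop
lemma getD_innerA (t : Int × Int) (ns : List (Int × Int))
    (d : PySem.Dict (Int × Int) (PySem.Set (Int × Int))) (c : Int × Int) :
    ((ns.foldl (fun d n => d.modify n PySem.Set.empty (fun s => PySem.Set.add s t)) d).getD c PySem.Set.empty)
    = if c ∈ ns then PySem.Set.add (d.getD c PySem.Set.empty) t else d.getD c PySem.Set.empty := by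
  induction ns generalizing d with
  | nil => simp
  | cons n ns ih =>
    simp only [List.foldl_cons, ih, PySem.Dict.getD_modify, List.mem_cons]
    by_cases h1 : c ∈ ns
    · by_cases h2 : c = n
      · simp [h2]
      · simp [h1, h2]
    · by_cases h2 : c = n
      · simp [h2]
      · simp [h1, h2]

-- keys through A's outer loop = B's candidate fold
lemma keys_outer (blacks l : List (Int × Int))
    (d : PySem.Dict (Int × Int) (PySem.Set (Int × Int))) :
    (l.foldl (fun d tile => (pvWs blacks tile).foldl
        (fun d n => d.modify n PySem.Set.empty (fun s => PySem.Set.add s tile)) d) d).keys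
    = l.foldl (fun s t => (pvWs blacks t).foldl PySem.Set.add s) d.keys := by
  induction l generalizing d with
  | nil => rfl
  | cons t l ih =>
    simp only [List.foldl_cons, ih]
    congr 1
    exact PySem.Dict.keys_foldl_modify (pvWs blacks t) PySem.Set.empty (fun _ _ s => PySem.Set.add s t) d

lemma getD_outer (blacks l : List (Int × Int))
    (d : PySem.Dict (Int × Int) (PySem.Set (Int × Int))) (c : Int × Int) :
    (l.foldl (fun d tile => (pvWs blacks tile).foldl
        (fun d n => d.modify n PySem.Set.empty (fun s => PySem.Set.add s tile)) d) d).getD c PySem.Set.empty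
    = l.foldl (fun s t => if c ∈ pvWs blacks t then PySem.Set.add s t else s) (d.getD c PySem.Set.empty) := by
  induction l generalizing d with
  | nil => rfl
  | cons t l ih =>
    simp only [List.foldl_cons, ih, getD_innerA]

lemma nodup_keys_outer (blacks l : List (Int × Int))
    (d : PySem.Dict (Int × Int) (PySem.Set (Int × Int))) (hd : d.keys.Nodup) :
    (l.foldl (fun d tile => (pvWs blacks tile).foldl
        (fun d n => d.modify n PySem.Set.empty (fun s => PySem.Set.add s tile)) d) d).keys.Nodup := by
  induction l generalizing d with
  | nil => exact hd
  | cons t l ih =>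
    exact ih _ (PySem.Dict.nodup_keys_foldl_modify_key (pvWs blacks t) (fun x => x)
      PySem.Set.empty (fun _ _ s => PySem.Set.add s t) d hd)

-- every candidate is white
lemma cand_not_black (blacks l : List (Int × Int)) (s : PySem.Set (Int × Int))
    (hs : ∀ c ∈ s, c ∉ blacks) (c : Int × Int)
    (hc : c ∈ l.foldl (fun s t => (pvWs blacks t).foldl PySem.Set.add s) s) : c ∉ blacks := by
  induction l generalizing s with
  | nil => exact hs c hc
  | cons t l ih =>
    refine ih _ ?_ hc
    intro x hx
    rcases (PySem.Set.mem_foldl_add (pvWs blacks t) (fun n => n) s x).mp hx with h | ⟨b, hb, rfl⟩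
    · exact hs x h
    · have := List.of_mem_filter hb
      simpa using this

-- the per-candidate counts agree (symmetry of hex adjacency)
lemma value_length_eq_count (blacks : List (Int × Int)) (c : Int × Int) (hc : c ∉ blacks) :
    (blacks.foldl (fun s t => if c ∈ pvWs blacks t then PySem.Set.add s t else s)
        (PySem.Set.empty : PySem.Set (Int × Int))).length
    = pvOffsets.countP (fun o => blacks.contains (c.1 + o.1, c.2 + o.2)) := by
  have hval : (blacks.foldl (fun s t => if c ∈ pvWs blacks t then PySem.Set.add s t else s)
        (PySem.Set.empty : PySem.Set (Int × Int)))
      = PySem.Set.ofList (blacks.filter (fun t => decide (c ∈ pvWs blacks t))) := by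
    rw [PySem.Set.ofList_eq_foldl, List.foldl_filter]
    apply PySem.List.foldl_congr_mem
    intro acc x _
    by_cases h : c ∈ pvWs blacks x <;> simp [h]
  rw [hval]
  have hR : ((neighbors c).filter (fun t => blacks.contains t)).length = pvOffsets.countP (fun o => blacks.contains (c.1 + o.1, c.2 + o.2)) := by
    rw [← List.countP_eq_length_filter, neighbors_eq_map_offsets, List.countP_map]
    rfl
  rw [← hR]
  have hperm : (PySem.Set.ofList (blacks.filter (fun t => decide (c ∈ pvWs blacks t)))).Perm
      ((neighbors c).filter (fun t => blacks.contains t)) := by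
    rw [List.perm_ext_iff_of_nodup (PySem.Set.nodup_ofList _)
      ((nodup_neighbors c).filter _)]
    intro x
    rw [PySem.Set.mem_ofList]
    simp only [List.mem_filter, pvWs, decide_eq_true_eq]
    constructor
    · rintro ⟨hxb, hcn, -⟩
      exact ⟨(mem_neighbors_symm c x).mp hcn, by simpa using hxb⟩
    · rintro ⟨hxn, hxb⟩
      exact ⟨by simpa using hxb, (mem_neighbors_symm c x).mpr hxn, by simpa using hc⟩
  exact hperm.length_eq

lemma ports_agree (blacks : List (Int × Int)) : flip_whites blacks = flip_whites_alt blacks := by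
  unfold flip_whites flip_whites_alt
  dsimp only
  -- normalise both inner loops to folds over pvWs
  have hA : ∀ d : PySem.Dict (Int × Int) (PySem.Set (Int × Int)), blacks.foldl (fun d tile =>
        (neighbors tile).foldl (fun d n =>
          if blacks.contains n then d
          else d.modify n PySem.Set.empty (fun s => PySem.Set.add s tile)) d) d
      = blacks.foldl (fun d tile => (pvWs blacks tile).foldl
          (fun d n => d.modify n PySem.Set.empty (fun s => PySem.Set.add s tile)) d) d := by
    intro d
    apply PySem.List.foldl_congr_mem
    intro acc t _
    exact innerA_eq blacks t acc
  have hB : blacks.foldl (fun s t =>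
        pvOffsets.foldl (fun s o =>
          if blacks.contains (t.1 + o.1, t.2 + o.2) then s
          else PySem.Set.add s (t.1 + o.1, t.2 + o.2)) s) PySem.Set.empty
      = blacks.foldl (fun s t => (pvWs blacks t).foldl PySem.Set.add s) PySem.Set.empty := by
    apply PySem.List.foldl_congr_mem
    intro acc t _
    exact innerB_eq blacks t acc
  simp only [hA, hB]
  set D := blacks.foldl (fun d tile => (pvWs blacks tile).foldl
      (fun d n => d.modify n PySem.Set.empty (fun s => PySem.Set.add s tile)) d)
      PySem.Dict.empty with hD
  have hnd : D.keys.Nodup := nodup_keys_outer blacks blacks PySem.Dict.empty (by simp)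
  have hkeys : D.keys = blacks.foldl (fun s t => (pvWs blacks t).foldl PySem.Set.add s) PySem.Set.empty := by
    rw [hD, keys_outer]; rfl
  rw [PySem.Dict.items_eq_map_keys D hnd PySem.Set.empty, List.foldl_map, hkeys]
  apply PySem.List.foldl_congr_mem
  intro acc c hc
  have hcb : c ∉ blacks := cand_not_black blacks blacks PySem.Set.empty (by simp) c hc
  have hv : D.getD c PySem.Set.empty
      = blacks.foldl (fun s t => if c ∈ pvWs blacks t then PySem.Set.add s t else s) PySem.Set.empty := by
    rw [hD, getD_outer]; rfl
  have hlen := value_length_eq_count blacks c hcb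
  rw [PySem.List.foldl_count_if]
  have : ((D.getD c PySem.Set.empty).length = 2)
      ↔ ((0 : Int) + (pvOffsets.countP (fun o => blacks.contains (c.1 + o.1, c.2 + o.2)) : Int) = 2) := by
    rw [hv, hlen]; omega
  by_cases h : (D.getD c PySem.Set.empty).length = 2
  · rw [if_pos h, if_pos (this.mp h)]
  · rw [if_neg h, if_neg (fun hh => h (this.mpr hh))]

-- ===== VERDICT (by name: the statement is the Claim_ definition above) =====
theorem flip_whites_spec : Claim_equal_flip_whites := by
  intro blacks _
  exact ports_agree blacks
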